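-- pv_equiv track=rewrite | github.com/sabajhn/Routability-Prediciton-from-circuit-images-using-GNN | preprocess/features.py | finout_blks
-- ===== SOURCE A (Python) =====
-- def finout_blks(edges, blks_size, fin, fout):
--     fin_blks=[]
--     fout_blks=[]
--     for k in range(len(edges)): # loop over the subarrays of edges
--         fin_blks.append([]) # use nested lists instead of sets
--         fout_blks.append([])
--         for i in range(blks_size[k]): # loop over the nodes of each subarray
--             fin_blks[k].append([])
--             fout_blks[k].append([])
--         for i, edge in enumerate(edges[k]): # loop over the edges of each subarray
--             a,b  = edge
--             fin_blks[k][b].append(a) # append instead of add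
--             fout_blks[k][a].append(b)
--     in_blks=[]
--     in_out_blks=[]
--     out_blks=[]
--     out_in_blks=[]
--     for k in range(len(fin)): # loop over the subarrays of fin and fout
--         in_blks.append([])
--         in_out_blks.append([])
--         out_blks.append([])
--         out_in_blks.append([])
--         for i in range(blks_size[k]): # loop over the nodes of each subarray
--             in_blks[k].append(0)
--             in_out_blks[k].append(0)
--             out_blks[k].append(0)
--             out_in_blks[k].append(0)
--         for i in range(len(fin_blks[k])): # loop over the fin_blks and fout_blks of each subarray
--             for j in fin_blks[k][i]:
--                 in_blks[k][i]+=fin[k][j] # use indexing instead of accessing by value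
--                 in_out_blks[k][i]+=fout[k][j]
--             for j in fout_blks[k][i]:
--                 out_blks[k][i]+=fout[k][j]
--                 out_in_blks[k][i]+=fin[k][j]
--     return in_blks,out_blks, in_out_blks, out_in_blks
-- ===== SOURCE B (Python) =====
-- def finout_blks(edges, blks_size, fin, fout):
--     in_blks = []
--     in_out_blks = []
--     out_blks = []
--     out_in_blks = []
--     for k in range(len(fin)):
--         n = blks_size[k]
--         ib = [0] * n
--         iob = [0] * n
--         ob = [0] * n
--         oib = [0] * n
--         for a, b in edges[k]:
--             ib[b] += fin[k][a]
--             iob[b] += fout[k][a]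
--             ob[a] += fout[k][b]
--             oib[a] += fin[k][b]
--         in_blks.append(ib)
--         in_out_blks.append(iob)
--         out_blks.append(ob)
--         out_in_blks.append(oib)
--     return in_blks, out_blks, in_out_blks, out_in_blks
-- ===== Notes on version B (the rewrite author's own statement) =====
-- stated objective: simpler
-- what changed: Drops A's intermediate fin_blks/fout_blks adjacency-list construction entirely and accumulates the four per-node sums directly in a single pass over each subgraph's edge list.
import Mathlib
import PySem

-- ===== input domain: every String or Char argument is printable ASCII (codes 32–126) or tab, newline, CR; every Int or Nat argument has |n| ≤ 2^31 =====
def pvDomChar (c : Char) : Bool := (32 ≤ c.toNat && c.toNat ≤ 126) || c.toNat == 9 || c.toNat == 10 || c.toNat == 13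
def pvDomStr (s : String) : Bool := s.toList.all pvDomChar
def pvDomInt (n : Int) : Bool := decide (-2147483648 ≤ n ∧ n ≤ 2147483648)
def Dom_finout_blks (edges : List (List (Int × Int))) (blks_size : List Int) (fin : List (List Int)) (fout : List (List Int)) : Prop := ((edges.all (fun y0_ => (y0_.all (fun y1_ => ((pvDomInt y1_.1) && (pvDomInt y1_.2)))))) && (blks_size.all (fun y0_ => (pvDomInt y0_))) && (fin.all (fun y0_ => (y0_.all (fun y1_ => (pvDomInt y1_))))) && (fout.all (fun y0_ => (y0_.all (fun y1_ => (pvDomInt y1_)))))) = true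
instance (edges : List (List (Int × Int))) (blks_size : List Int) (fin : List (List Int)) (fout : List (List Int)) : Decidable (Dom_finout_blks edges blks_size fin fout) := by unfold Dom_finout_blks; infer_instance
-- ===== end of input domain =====

-- B drops A's intermediate fin_blks/fout_blks adjacency lists and accumulates the four
-- per-node sums directly in one pass over each subgraph's edge list (objective: simpler).

-- ===== PORT A =====
-- per-subgraph phase-1 body of A: build fin_blks[k]/fout_blks[k] (append [] per node, then
-- append edge endpoints)
def pvAdjRow (n : Int) (es : List (Int × Int)) :
    List (List Int) × List (List Int) :=
  let rowIn := (PySem.List.pyRange 0 n 1).foldl (fun r _ => r ++ [([] : List Int)]) []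
  let rowOut := (PySem.List.pyRange 0 n 1).foldl (fun r _ => r ++ [([] : List Int)]) []
  es.foldl (fun (p : List (List Int) × List (List Int)) e =>
      (PySem.List.pySetD p.1 e.2 (PySem.List.pyGetD p.1 e.2 [] ++ [e.1]),
       PySem.List.pySetD p.2 e.1 (PySem.List.pyGetD p.2 e.1 [] ++ [e.2])))
    (rowIn, rowOut)

-- per-subgraph phase-2 body of A: zero rows, then for each node i add fin/fout of the
-- stored neighbours; state order is (in, in_out, out, out_in) as declared in A
def pvSumRow (n : Int) (adjIn adjOut : List (List Int)) (fi fo : List Int) :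
    List Int × List Int × List Int × List Int :=
  let z := (PySem.List.pyRange 0 n 1).foldl
    (fun (q : List Int × List Int × List Int × List Int) _ =>
      (q.1 ++ [0], q.2.1 ++ [0], q.2.2.1 ++ [0], q.2.2.2 ++ [0])) ([], [], [], [])
  (PySem.List.pyRange 0 (PySem.List.len adjIn) 1).foldl
    (fun (q : List Int × List Int × List Int × List Int) i =>
      let p1 := (PySem.List.pyGetD adjIn i []).foldl (fun (p : List Int × List Int) j =>
          (PySem.List.pySetD p.1 i (PySem.List.pyGetD p.1 i 0 + PySem.List.pyGetD fi j 0),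
           PySem.List.pySetD p.2 i (PySem.List.pyGetD p.2 i 0 + PySem.List.pyGetD fo j 0)))
        (q.1, q.2.1)
      let p2 := (PySem.List.pyGetD adjOut i []).foldl (fun (p : List Int × List Int) j =>
          (PySem.List.pySetD p.1 i (PySem.List.pyGetD p.1 i 0 + PySem.List.pyGetD fo j 0),
           PySem.List.pySetD p.2 i (PySem.List.pyGetD p.2 i 0 + PySem.List.pyGetD fi j 0)))
        (q.2.2.1, q.2.2.2)
      (p1.1, p1.2, p2.1, p2.2)) z

def finout_blks (edges : List (List (Int × Int))) (blks_size : List Int) (fin : List (List Int)) (fout : List (List Int)) : List (List Int) × List (List Int) × List (List Int) × List (List Int) :=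
  let fbs := (PySem.List.pyRange 0 (PySem.List.len edges) 1).foldl
    (fun (st : List (List (List Int)) × List (List (List Int))) k =>
      let rows := pvAdjRow (PySem.List.pyGetD blks_size k 0) (PySem.List.pyGetD edges k [])
      (st.1 ++ [rows.1], st.2 ++ [rows.2])) ([], [])
  let res := (PySem.List.pyRange 0 (PySem.List.len fin) 1).foldl
    (fun (st : List (List Int) × List (List Int) × List (List Int) × List (List Int)) k =>
      let q := pvSumRow (PySem.List.pyGetD blks_size k 0) (PySem.List.pyGetD fbs.1 k [])
        (PySem.List.pyGetD fbs.2 k []) (PySem.List.pyGetD fin k []) (PySem.List.pyGetD fout k [])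
      (st.1 ++ [q.1], st.2.1 ++ [q.2.1], st.2.2.1 ++ [q.2.2.1], st.2.2.2 ++ [q.2.2.2]))
    ([], [], [], [])
  (res.1, res.2.2.1, res.2.1, res.2.2.2)

-- ===== PORT B =====
-- per-subgraph body of B: zero rows ([0]*n is [] for n ≤ 0, exactly List.replicate n.toNat),
-- then one pass over the edges accumulating all four sums; state order (in, in_out, out, out_in)
def pvEdgeRow (n : Int) (es : List (Int × Int)) (fi fo : List Int) :
    List Int × List Int × List Int × List Int :=
  let z : List Int := List.replicate n.toNat 0
  es.foldl (fun (q : List Int × List Int × List Int × List Int) e =>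
      (PySem.List.pySetD q.1 e.2 (PySem.List.pyGetD q.1 e.2 0 + PySem.List.pyGetD fi e.1 0),
       PySem.List.pySetD q.2.1 e.2 (PySem.List.pyGetD q.2.1 e.2 0 + PySem.List.pyGetD fo e.1 0),
       PySem.List.pySetD q.2.2.1 e.1 (PySem.List.pyGetD q.2.2.1 e.1 0 + PySem.List.pyGetD fo e.2 0),
       PySem.List.pySetD q.2.2.2 e.1 (PySem.List.pyGetD q.2.2.2 e.1 0 + PySem.List.pyGetD fi e.2 0)))
    (z, z, z, z)

def finout_blks_alt (edges : List (List (Int × Int))) (blks_size : List Int) (fin : List (List Int)) (fout : List (List Int)) : List (List Int) × List (List Int) × List (List Int) × List (List Int) :=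
  let res := (PySem.List.pyRange 0 (PySem.List.len fin) 1).foldl
    (fun (st : List (List Int) × List (List Int) × List (List Int) × List (List Int)) k =>
      let q := pvEdgeRow (PySem.List.pyGetD blks_size k 0) (PySem.List.pyGetD edges k [])
        (PySem.List.pyGetD fin k []) (PySem.List.pyGetD fout k [])
      (st.1 ++ [q.1], st.2.1 ++ [q.2.1], st.2.2.1 ++ [q.2.2.1], st.2.2.2 ++ [q.2.2.2]))
    ([], [], [], [])
  (res.1, res.2.2.1, res.2.1, res.2.2.2)

-- ===== PRECONDITION & SPEC =====
-- Pre_ is exactly the set of inputs on which the Python A returns normally: it needs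
-- len(fin) ≤ len(edges) ≤ len(blks_size), every edge endpoint a valid (possibly negative)
-- Python index into the blks_size[k]-long per-node rows, and — for the subgraphs that are
-- summed, k < len(fin) — a valid index into fin[k] and fout[k]; anywhere else A raises
-- IndexError.
def Pre_finout_blks (edges : List (List (Int × Int))) (blks_size : List Int) (fin : List (List Int)) (fout : List (List Int)) : Prop :=
  fin.length ≤ edges.length ∧ edges.length ≤ blks_size.length ∧
  (∀ k < edges.length, ∀ e ∈ edges.getD k [],
      PySem.Raise.InRange (blks_size.getD k 0).toNat e.1 ∧
      PySem.Raise.InRange (blks_size.getD k 0).toNat e.2) ∧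
  (∀ k < fin.length, ∀ e ∈ edges.getD k [],
      PySem.Raise.InRange (fin.getD k []).length e.1 ∧
      PySem.Raise.InRange (fin.getD k []).length e.2 ∧
      PySem.Raise.InRange (fout.getD k []).length e.1 ∧
      PySem.Raise.InRange (fout.getD k []).length e.2)
instance (edges : List (List (Int × Int))) (blks_size : List Int) (fin : List (List Int)) (fout : List (List Int)) : Decidable (Pre_finout_blks edges blks_size fin fout) := by unfold Pre_finout_blks; infer_instance

def pvWitness_finout_blks : (List (List (Int × Int))) × List Int × List (List Int) × List (List Int) :=
  ([[(0, 1), (1, 0), (0, 0)]], [2], [[3, 4]], [[5, 6]])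

def Spec_finout_blks (edges : List (List (Int × Int))) (blks_size : List Int) (fin : List (List Int)) (fout : List (List Int)) (out : List (List Int) × List (List Int) × List (List Int) × List (List Int)) : Prop := out = finout_blks_alt edges blks_size fin fout
instance (edges : List (List (Int × Int))) (blks_size : List Int) (fin : List (List Int)) (fout : List (List Int)) (out : List (List Int) × List (List Int) × List (List Int) × List (List Int)) : Decidable (Spec_finout_blks edges blks_size fin fout out) := by unfold Spec_finout_blks; infer_instance

-- ===== CLAIM (what is proved, stated in full; the proofs are below) =====
def Claim_equal_finout_blks : Prop := ∀ (edges : List (List (Int × Int))) (blks_size : List Int) (fin : List (List Int)) (fout : List (List Int)), Dom_finout_blks edges blks_size fin fout → Pre_finout_blks edges blks_size fin fout → Spec_finout_blks edges blks_size fin fout (finout_blks edges blks_size fin fout)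

-- ===== LEMMAS AND PROOFS =====

-- normalised (Python) index of i into a list of length n, valid under Raise.InRange n i
def pvNidx (n : Nat) (i : Int) : Nat := if 0 ≤ i then i.toNat else n - (-i).toNat

theorem pvNidx_natCast (n m : Nat) : pvNidx n (m : Int) = m := by
  simp [pvNidx]

theorem pyIdx?_eq_nidx (n : Nat) (i : Int) (h : PySem.Raise.InRange n i) :
    PySem.List.pyIdx? n i = some (pvNidx n i) := by
  obtain ⟨h1, h2⟩ := h
  unfold PySem.List.pyIdx? pvNidx
  split_ifs <;> first | rfl | omega

theorem pyGetD_inRange {α : Type} (xs : List α) (i : Int) (d : α)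
    (h : PySem.Raise.InRange xs.length i) :
    PySem.List.pyGetD xs i d = xs.getD (pvNidx xs.length i) d := by
  simp [PySem.List.pyGetD, PySem.List.pyGet?, pyIdx?_eq_nidx _ _ h, List.getD_eq_getElem?_getD]

theorem pySetD_inRange {α : Type} (xs : List α) (i : Int) (v : α)
    (h : PySem.Raise.InRange xs.length i) :
    PySem.List.pySetD xs i v = xs.set (pvNidx xs.length i) v := by
  simp [PySem.List.pySetD, PySem.List.pySet?, pyIdx?_eq_nidx _ _ h]

-- folding pySetD updates preserves the length
theorem length_foldl_pySetD {ε α : Type} (l : List ε) (key : ε → Int)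
    (w : List α → ε → α) (r0 : List α) :
    (l.foldl (fun r e => PySem.List.pySetD r (key e) (w r e)) r0).length = r0.length := by
  induction l generalizing r0 with
  | nil => rfl
  | cons e l ih =>
    simp only [List.foldl_cons]
    rw [ih]
    exact PySem.List.length_pySetD _ _ _

-- congruence for foldl under an invariant on the accumulator
theorem foldl_congr_inv {ε α : Type} (l : List ε) (f g : α → ε → α) (P : α → Prop)
    (r0 : α) (h0 : P r0) (hfg : ∀ r e, e ∈ l → P r → f r e = g r e)
    (hP : ∀ r e, e ∈ l → P r → P (g r e)) :
    l.foldl f r0 = l.foldl g r0 := by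
  induction l generalizing r0 with
  | nil => rfl
  | cons e l ih =>
    simp only [List.foldl_cons]
    rw [hfg r0 e (by simp) h0]
    exact ih _ (hP r0 e (by simp) h0)
      (fun r e' he' hr => hfg r e' (by simp [he']) hr)
      (fun r e' he' hr => hP r e' (by simp [he']) hr)

-- the value at slot i of a "scatter/accumulate" fold: the updates whose key lands on i,
-- folded in order
theorem foldl_pySetD_getD {ε α : Type} (l : List ε) (key : ε → Int) (g : α → ε → α)
    (d : α) (n : Nat) :
    ∀ (r0 : List α), r0.length = n → (∀ e ∈ l, PySem.Raise.InRange n (key e)) →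
    ∀ i : Nat, i < n →
    (l.foldl (fun r e => PySem.List.pySetD r (key e) (g (PySem.List.pyGetD r (key e) d) e)) r0).getD i d
      = (l.filter (fun e => pvNidx n (key e) == i)).foldl g (r0.getD i d) := by
  induction l with
  | nil => intro r0 _ _ i _; rfl
  | cons e l ih =>
    intro r0 hlen hk i hi
    have hre : PySem.Raise.InRange r0.length (key e) := hlen ▸ hk e (by simp)
    simp only [List.foldl_cons, List.filter_cons]
    rw [pySetD_inRange _ _ _ hre, pyGetD_inRange _ _ _ hre]
    rw [ih _ (by simp [hlen]) (fun e' he' => hk e' (by simp [he'])) i hi]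
    have hset : (r0.set (pvNidx r0.length (key e)) (g (r0.getD (pvNidx r0.length (key e)) d) e)).getD i d
        = if pvNidx n (key e) == i then g (r0.getD i d) e else r0.getD i d := by
      by_cases hEq : pvNidx n (key e) = i
      · simp [List.getD_eq_getElem?_getD, hlen, hEq, hi]
      · simp [List.getD_eq_getElem?_getD, hlen, hEq]
    rw [hset]
    by_cases hEq : pvNidx n (key e) = i
    · simp [hEq]
    · simp [hEq]

-- repeated "+=" at one fixed index collapses to a single update by the sum
theorem foldl_pySetD_const_idx {β : Type} (js : List β) (i : Nat) (v : β → Int) :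
    ∀ (r : List Int), i < r.length →
    js.foldl (fun r' j => PySem.List.pySetD r' (i : Int) (PySem.List.pyGetD r' (i : Int) 0 + v j)) r
      = PySem.List.pySetD r (i : Int) (PySem.List.pyGetD r (i : Int) 0 + (js.map v).sum) := by
  induction js with
  | nil =>
    intro r hr
    simp [PySem.List.pySetD_natCast, PySem.List.pyGetD_natCast,
      List.getD_eq_getElem?_getD, List.getElem?_eq_getElem hr, List.set_getElem_self]
  | cons j js ih =>
    intro r hr
    simp only [List.foldl_cons]
    rw [ih _ (by simp [hr])]
    rw [PySem.List.pyGetD_pySetD_natCast _ _ _ _ _ (by omega)]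
    simp only [PySem.List.pySetD_natCast, List.set_set, List.map_cons, List.sum_cons, if_true]
    rw [add_assoc]

-- length of range(n) for an Int bound (empty when n ≤ 0)
theorem pyRange_zero_len (n : Int) : (PySem.List.pyRange 0 n 1).length = n.toNat := by
  by_cases h : 0 ≤ n
  · obtain ⟨m, rfl⟩ := Int.eq_ofNat_of_zero_le h
    simp [PySem.List.pyRange_zero_natCast]
  · have hlt : ¬ ((0 : Int) < n) := by omega
    simp only [PySem.List.pyRange]
    simp [hlt]
    omega

-- appending a constant per range element builds a replicate row
theorem foldl_append_zero_row {α : Type} (l : List Int) (c : α) :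
    l.foldl (fun (r : List α) _ => r ++ [c]) [] = List.replicate l.length c := by
  rw [PySem.List.foldl_append_singleton_eq_map (fun _ => c) l []]
  simp [List.map_const']

theorem range_filter_eq (n i : Nat) (h : i < n) :
    (List.range n).filter (fun j => j == i) = [i] := by
  induction n with
  | zero => omega
  | succ m ih =>
    rw [List.range_succ, List.filter_append]
    by_cases hm : i < m
    · rw [ih hm]
      have : ¬ (m == i) = true := by simp; omega
      simp [this]
    · have hi : i = m := by omega
      subst hi
      have : (List.range i).filter (fun j => j == i) = [] := by
        apply List.filter_eq_nil_iff.mpr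
        intro a ha
        simp at ha ⊢
        omega
      simp [this]


-- proof-level views of the per-subgraph loops
def pvInner (vals : List Int) (i : Int) (js : List Int) (r : List Int) : List Int :=
  js.foldl (fun r' j =>
    PySem.List.pySetD r' i (PySem.List.pyGetD r' i 0 + PySem.List.pyGetD vals j 0)) r

def pvStep (adj : List (List Int)) (vals : List Int) (r : List Int) (i : Int) : List Int :=
  pvInner vals i (PySem.List.pyGetD adj i []) r

def pvComp (rng : List Int) (adj : List (List Int)) (vals : List Int) (z : List Int) : List Int :=
  rng.foldl (pvStep adj vals) z

def pvAdj (es : List (Int × Int)) (key src : Int × Int → Int) (z : List (List Int)) :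
    List (List Int) :=
  es.foldl (fun r e =>
    PySem.List.pySetD r (key e) (PySem.List.pyGetD r (key e) [] ++ [src e])) z

def pvAcc (es : List (Int × Int)) (key src : Int × Int → Int) (vals : List Int)
    (z : List Int) : List Int :=
  es.foldl (fun r e =>
    PySem.List.pySetD r (key e)
      (PySem.List.pyGetD r (key e) 0 + PySem.List.pyGetD vals (src e) 0)) z

-- splitting the componentwise folds of the ports into per-component folds
theorem adj_split (es : List (Int × Int)) (a b : List (List Int)) :
    es.foldl (fun (p : List (List Int) × List (List Int)) e =>
        (PySem.List.pySetD p.1 e.2 (PySem.List.pyGetD p.1 e.2 [] ++ [e.1]),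
         PySem.List.pySetD p.2 e.1 (PySem.List.pyGetD p.2 e.1 [] ++ [e.2]))) (a, b)
      = (pvAdj es (fun e => e.2) (fun e => e.1) a, pvAdj es (fun e => e.1) (fun e => e.2) b) := by
  induction es generalizing a b with
  | nil => rfl
  | cons e es ih => exact ih _ _

theorem pair_split (fi fo : List Int) (i : Int) (js : List Int) (a b : List Int) :
    js.foldl (fun (p : List Int × List Int) j =>
        (PySem.List.pySetD p.1 i (PySem.List.pyGetD p.1 i 0 + PySem.List.pyGetD fi j 0),
         PySem.List.pySetD p.2 i (PySem.List.pyGetD p.2 i 0 + PySem.List.pyGetD fo j 0))) (a, b)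
      = (pvInner fi i js a, pvInner fo i js b) := by
  induction js generalizing a b with
  | nil => rfl
  | cons j js ih => exact ih _ _

theorem zero_split (rng : List Int) (a b c d : List Int) :
    rng.foldl (fun (q : List Int × List Int × List Int × List Int) _ =>
        (q.1 ++ [0], q.2.1 ++ [0], q.2.2.1 ++ [0], q.2.2.2 ++ [0])) (a, b, c, d)
      = (a ++ List.replicate rng.length 0, b ++ List.replicate rng.length 0,
         c ++ List.replicate rng.length 0, d ++ List.replicate rng.length 0) := by
  induction rng generalizing a b c d with
  | nil => simp
  | cons x rng ih =>
    rw [List.foldl_cons, ih]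
    simp [List.replicate_succ]

theorem outer_split (adjIn adjOut : List (List Int)) (fi fo : List Int) (rng : List Int)
    (a b c d : List Int) :
    rng.foldl (fun (q : List Int × List Int × List Int × List Int) i =>
        let p1 := (PySem.List.pyGetD adjIn i []).foldl (fun (p : List Int × List Int) j =>
            (PySem.List.pySetD p.1 i (PySem.List.pyGetD p.1 i 0 + PySem.List.pyGetD fi j 0),
             PySem.List.pySetD p.2 i (PySem.List.pyGetD p.2 i 0 + PySem.List.pyGetD fo j 0)))
          (q.1, q.2.1)
        let p2 := (PySem.List.pyGetD adjOut i []).foldl (fun (p : List Int × List Int) j =>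
            (PySem.List.pySetD p.1 i (PySem.List.pyGetD p.1 i 0 + PySem.List.pyGetD fo j 0),
             PySem.List.pySetD p.2 i (PySem.List.pyGetD p.2 i 0 + PySem.List.pyGetD fi j 0)))
          (q.2.2.1, q.2.2.2)
        (p1.1, p1.2, p2.1, p2.2)) (a, b, c, d)
      = (pvComp rng adjIn fi a, pvComp rng adjIn fo b,
         pvComp rng adjOut fo c, pvComp rng adjOut fi d) := by
  induction rng generalizing a b c d with
  | nil => rfl
  | cons i rng ih =>
    rw [List.foldl_cons]
    dsimp only
    rw [pair_split fi fo i (PySem.List.pyGetD adjIn i []) a b,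
      pair_split fo fi i (PySem.List.pyGetD adjOut i []) c d]
    exact ih _ _ _ _

theorem edge_split (es : List (Int × Int)) (fi fo : List Int) (a b c d : List Int) :
    es.foldl (fun (q : List Int × List Int × List Int × List Int) e =>
        (PySem.List.pySetD q.1 e.2 (PySem.List.pyGetD q.1 e.2 0 + PySem.List.pyGetD fi e.1 0),
         PySem.List.pySetD q.2.1 e.2 (PySem.List.pyGetD q.2.1 e.2 0 + PySem.List.pyGetD fo e.1 0),
         PySem.List.pySetD q.2.2.1 e.1 (PySem.List.pyGetD q.2.2.1 e.1 0 + PySem.List.pyGetD fo e.2 0),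
         PySem.List.pySetD q.2.2.2 e.1 (PySem.List.pyGetD q.2.2.2 e.1 0 + PySem.List.pyGetD fi e.2 0)))
      (a, b, c, d)
      = (pvAcc es (fun e => e.2) (fun e => e.1) fi a, pvAcc es (fun e => e.2) (fun e => e.1) fo b,
         pvAcc es (fun e => e.1) (fun e => e.2) fo c, pvAcc es (fun e => e.1) (fun e => e.2) fi d) := by
  induction es generalizing a b c d with
  | nil => rfl
  | cons e es ih => exact ih _ _ _ _

theorem pvAdjRow_eq (n : Int) (es : List (Int × Int)) :
    pvAdjRow n es = (pvAdj es (fun e => e.2) (fun e => e.1) (List.replicate n.toNat []),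
      pvAdj es (fun e => e.1) (fun e => e.2) (List.replicate n.toNat [])) := by
  simp only [pvAdjRow, foldl_append_zero_row, pyRange_zero_len]
  exact adj_split es _ _

theorem pvSumRow_eq (n : Int) (adjIn adjOut : List (List Int)) (fi fo : List Int) :
    pvSumRow n adjIn adjOut fi fo =
      (pvComp (PySem.List.pyRange 0 (PySem.List.len adjIn) 1) adjIn fi (List.replicate n.toNat 0),
       pvComp (PySem.List.pyRange 0 (PySem.List.len adjIn) 1) adjIn fo (List.replicate n.toNat 0),
       pvComp (PySem.List.pyRange 0 (PySem.List.len adjIn) 1) adjOut fo (List.replicate n.toNat 0),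
       pvComp (PySem.List.pyRange 0 (PySem.List.len adjIn) 1) adjOut fi (List.replicate n.toNat 0)) := by
  simp only [pvSumRow]
  rw [zero_split, pyRange_zero_len]
  simp only [List.nil_append]
  exact outer_split adjIn adjOut fi fo _ _ _ _ _

theorem pvEdgeRow_eq (n : Int) (es : List (Int × Int)) (fi fo : List Int) :
    pvEdgeRow n es fi fo =
      (pvAcc es (fun e => e.2) (fun e => e.1) fi (List.replicate n.toNat 0),
       pvAcc es (fun e => e.2) (fun e => e.1) fo (List.replicate n.toNat 0),
       pvAcc es (fun e => e.1) (fun e => e.2) fo (List.replicate n.toNat 0),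
       pvAcc es (fun e => e.1) (fun e => e.2) fi (List.replicate n.toNat 0)) := by
  simp only [pvEdgeRow]
  exact edge_split es fi fo _ _ _ _

-- one component: summing vals over A's adjacency row equals B's direct accumulation
theorem comp_eq (nN : Nat) (es : List (Int × Int)) (key src : Int × Int → Int)
    (vals : List Int) (hkey : ∀ e ∈ es, PySem.Raise.InRange nN (key e)) :
    pvComp (PySem.List.pyRange 0 (nN : Int) 1) (pvAdj es key src (List.replicate nN []))
        vals (List.replicate nN 0)
      = pvAcc es key src vals (List.replicate nN 0) := by
  have hadjlen : (pvAdj es key src (List.replicate nN ([] : List Int))).length = nN := by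
    rw [pvAdj, length_foldl_pySetD]; simp
  -- the adjacency row at slot i lists the sources of the edges whose key lands on i
  have hadj : ∀ i : Nat, i < nN →
      (pvAdj es key src (List.replicate nN ([] : List Int))).getD i []
        = (es.filter (fun e => pvNidx nN (key e) == i)).map src := by
    intro i hi
    rw [pvAdj, foldl_pySetD_getD es key (fun a e => a ++ [src e]) [] nN _ (by simp) hkey i hi]
    rw [PySem.List.foldl_append_singleton_eq_map src]
    simp
  set adj := pvAdj es key src (List.replicate nN ([] : List Int)) with hadjdef
  -- collapse the inner per-node loop into a single update by the neighbour sum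
  have h1 : pvComp (PySem.List.pyRange 0 (nN : Int) 1) adj vals (List.replicate nN 0)
      = (PySem.List.pyRange 0 (nN : Int) 1).foldl
          (fun r i => PySem.List.pySetD r i (PySem.List.pyGetD r i 0 +
            ((PySem.List.pyGetD adj i []).map (fun j => PySem.List.pyGetD vals j 0)).sum))
          (List.replicate nN 0) := by
    apply foldl_congr_inv _ _ _ (fun r : List Int => r.length = nN) _ (by simp)
    · intro r i hi hr
      have hmem := PySem.List.mem_pyRange_one.mp hi
      obtain ⟨m, rfl⟩ := Int.eq_ofNat_of_zero_le hmem.1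
      have hmlt : m < r.length := by omega
      exact foldl_pySetD_const_idx _ m _ r hmlt
    · intro r i _ hr
      simp [PySem.List.length_pySetD, hr]
  rw [h1]
  -- compare slot by slot
  apply List.ext_getElem
  · rw [length_foldl_pySetD _ (fun i : Int => i)
      (fun r i => PySem.List.pyGetD r i 0 +
        ((PySem.List.pyGetD adj i []).map (fun j => PySem.List.pyGetD vals j 0)).sum)]
    rw [pvAcc, length_foldl_pySetD]
  · intro i hL hR
    have hi : i < nN := by
      have := hL
      rw [length_foldl_pySetD _ (fun i : Int => i)
        (fun r i => PySem.List.pyGetD r i 0 +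
          ((PySem.List.pyGetD adj i []).map (fun j => PySem.List.pyGetD vals j 0)).sum)] at this
      simpa using this
    have hgetL := foldl_pySetD_getD (PySem.List.pyRange 0 (nN : Int) 1) (fun i : Int => i)
      (fun a i => a + ((PySem.List.pyGetD adj i []).map (fun j => PySem.List.pyGetD vals j 0)).sum)
      0 nN (List.replicate nN 0) (by simp)
      (fun e he => by
        have := PySem.List.mem_pyRange_one.mp he
        exact ⟨by show -(nN : Int) ≤ e; omega, by show e < (nN : Int); omega⟩) i hi
    have hgetR := foldl_pySetD_getD es key
      (fun a e => a + PySem.List.pyGetD vals (src e) 0) 0 nN (List.replicate nN 0)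
      (by simp) hkey i hi
    rw [← List.getD_eq_getElem _ 0 hL, ← List.getD_eq_getElem _ 0 hR, hgetL]
    rw [pvAcc, hgetR]
    -- the filtered index range is the singleton [i]
    have hfilter : (PySem.List.pyRange 0 (nN : Int) 1).filter (fun x => pvNidx nN x == i)
        = [(i : Int)] := by
      rw [PySem.List.pyRange_zero_natCast, List.filter_map]
      simp only [Function.comp_def, pvNidx_natCast]
      rw [range_filter_eq nN i hi]
      rfl
    rw [hfilter]
    simp only [List.foldl_cons, List.foldl_nil]
    rw [PySem.List.pyGetD_natCast adj i, hadj i hi]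
    rw [PySem.List.foldl_add]
    simp [List.map_map, Function.comp_def]

-- the per-subgraph rows of A and of B coincide
theorem row_eq (n : Int) (es : List (Int × Int)) (fi fo : List Int)
    (hab : ∀ e ∈ es, PySem.Raise.InRange n.toNat e.1 ∧ PySem.Raise.InRange n.toNat e.2) :
    pvSumRow n (pvAdjRow n es).1 (pvAdjRow n es).2 fi fo = pvEdgeRow n es fi fo := by
  have hlen : (pvAdj es (fun e => e.2) (fun e => e.1) (List.replicate n.toNat ([] : List Int))).length
      = n.toNat := by
    rw [pvAdj, length_foldl_pySetD]
    simp
  rw [pvAdjRow_eq, pvSumRow_eq, pvEdgeRow_eq]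
  simp only [PySem.List.len_eq, hlen]
  refine Prod.ext ?_ (Prod.ext ?_ (Prod.ext ?_ ?_))
  · exact comp_eq n.toNat es _ _ fi (fun e he => (hab e he).2)
  · exact comp_eq n.toNat es _ _ fo (fun e he => (hab e he).2)
  · exact comp_eq n.toNat es _ _ fo (fun e he => (hab e he).1)
  · exact comp_eq n.toNat es _ _ fi (fun e he => (hab e he).1)

-- phase 1 of A builds the list of per-subgraph adjacency rows
theorem fbs_split (edges : List (List (Int × Int))) (blks_size : List Int) (l : List Int)
    (a b : List (List (List Int))) :
    l.foldl (fun (st : List (List (List Int)) × List (List (List Int))) k =>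
        let rows := pvAdjRow (PySem.List.pyGetD blks_size k 0) (PySem.List.pyGetD edges k [])
        (st.1 ++ [rows.1], st.2 ++ [rows.2])) (a, b)
      = (a ++ l.map (fun k =>
            (pvAdjRow (PySem.List.pyGetD blks_size k 0) (PySem.List.pyGetD edges k [])).1),
         b ++ l.map (fun k =>
            (pvAdjRow (PySem.List.pyGetD blks_size k 0) (PySem.List.pyGetD edges k [])).2)) := by
  induction l generalizing a b with
  | nil => simp
  | cons k l ih =>
    rw [List.foldl_cons]
    dsimp only
    rw [ih]
    simp

-- ===== VERDICT (by name: the statement is the Claim_ definition above) =====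
theorem finout_blks_spec : Claim_equal_finout_blks := by
  intro edges blks_size fin fout _hdom hpre
  obtain ⟨hFE, hEB, h3, _h4⟩ := hpre
  show finout_blks edges blks_size fin fout = finout_blks_alt edges blks_size fin fout
  simp only [finout_blks, finout_blks_alt]
  rw [fbs_split edges blks_size _ [] []]
  simp only [List.nil_append]
  have hres : (PySem.List.pyRange 0 (PySem.List.len fin) 1).foldl
      (fun (st : List (List Int) × List (List Int) × List (List Int) × List (List Int)) k =>
        let q := pvSumRow (PySem.List.pyGetD blks_size k 0)
          (PySem.List.pyGetD ((PySem.List.pyRange 0 (PySem.List.len edges) 1).map (fun k =>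
            (pvAdjRow (PySem.List.pyGetD blks_size k 0) (PySem.List.pyGetD edges k [])).1)) k [])
          (PySem.List.pyGetD ((PySem.List.pyRange 0 (PySem.List.len edges) 1).map (fun k =>
            (pvAdjRow (PySem.List.pyGetD blks_size k 0) (PySem.List.pyGetD edges k [])).2)) k [])
          (PySem.List.pyGetD fin k []) (PySem.List.pyGetD fout k [])
        (st.1 ++ [q.1], st.2.1 ++ [q.2.1], st.2.2.1 ++ [q.2.2.1], st.2.2.2 ++ [q.2.2.2]))
      ([], [], [], [])
      = (PySem.List.pyRange 0 (PySem.List.len fin) 1).foldl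
      (fun (st : List (List Int) × List (List Int) × List (List Int) × List (List Int)) k =>
        let q := pvEdgeRow (PySem.List.pyGetD blks_size k 0) (PySem.List.pyGetD edges k [])
          (PySem.List.pyGetD fin k []) (PySem.List.pyGetD fout k [])
        (st.1 ++ [q.1], st.2.1 ++ [q.2.1], st.2.2.1 ++ [q.2.2.1], st.2.2.2 ++ [q.2.2.2]))
      ([], [], [], []) := by
    apply PySem.List.foldl_congr_mem
    intro st k hk
    rw [PySem.List.len_eq] at hk
    have hmem := PySem.List.mem_pyRange_one.mp hk
    obtain ⟨m, rfl⟩ := Int.eq_ofNat_of_zero_le hmem.1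
    have hmF : m < fin.length := by omega
    have hmE : m < edges.length := by omega
    dsimp only
    rw [PySem.List.len_eq edges,
      PySem.List.pyGetD_map_pyRange _ edges.length m [] hmE,
      PySem.List.pyGetD_map_pyRange _ edges.length m [] hmE]
    rw [row_eq (PySem.List.pyGetD blks_size (m : Int) 0) (PySem.List.pyGetD edges (m : Int) [])
      (PySem.List.pyGetD fin (m : Int) []) (PySem.List.pyGetD fout (m : Int) [])
      (by
        intro e he
        rw [PySem.List.pyGetD_natCast] at he ⊢
        exact h3 m hmE e he)]
  rw [hres]
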